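-- pv_equiv track=rewrite | github.com/nkossally/leet_code | Python/2518. Number of Great Partitions.py | countPartitionsFast2
-- ===== SOURCE A (Python) =====
-- from typing import List
--
-- def countPartitionsFast2(A: List[int], k: int) -> int:
--     if sum(A) < k * 2: return 0
--     mod = 10**9 + 7
--     dp = [1] + [0] * (k - 1)
--     for a in A:
--         for i in range(k - 1 - a, -1, -1):
--             dp[i + a] += dp[i]
--     return (pow(2, len(A), mod) - sum(dp) * 2) % mod
-- ===== SOURCE B (Python) =====
-- from typing import List
--
-- def countPartitionsFast2(A: List[int], k: int) -> int:
--     # 2^n - 2 * (# subsets with sum <= k-1), the bad-subset count computed by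
--     # divide and conquer: each half yields a sparse dict {sum: count % mod} of
--     # subset sums capped at k-1, and halves are merged by convolving the dicts
--     # (sums beyond the cap dropped).  Counts are kept modulo mod throughout,
--     # so they never grow into big integers.
--     if sum(A) < k * 2:
--         return 0
--     mod = 10 ** 9 + 7
--     cap = k - 1
--
--     def merge(left, right):
--         out = {}
--         for s1, c1 in left.items():
--             for s2, c2 in right.items():
--                 s = s1 + s2
--                 if s <= cap:
--                     out[s] = (out.get(s, 0) + c1 * c2) % mod
--         return out
--
--     def dist(lo, hi):
--         # sparse subset-sum distribution of A[lo:hi], truncated at cap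
--         if hi - lo <= 1:
--             d = {0: 1} if cap >= 0 else {}
--             if lo < hi:
--                 a = A[lo]
--                 if 0 <= a <= cap:
--                     d[a] = (d.get(a, 0) + 1) % mod
--             return d
--         mid = (lo + hi) // 2
--         return merge(dist(lo, mid), dist(mid, hi))
--
--     bad = sum(dist(0, len(A)).values()) % mod
--     return (pow(2, len(A), mod) - 2 * bad) % mod
-- ===== Notes on version B (the rewrite author's own statement) =====
-- stated objective: alternative
-- what changed: Replaces A's in-place reverse knapsack sweep over a dense dp array of exact (unbounded) subset counts by a divide-and-conquer recursion: each half of the list yields a sparse dict {sum: count mod 10^9+7} of subset sums truncated at k-1, the halves are merged by convolving the two dicts (sums beyond the cap dropped), and the bad-subset count is the value sum of the root dict.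
-- intended difference: On inputs with k <= 0 that pass the sum guard, A's degenerate one-cell dp still counts the empty subset as bad and returns (2^n - 2) % mod, while B returns 2^n % mod, the intended answer since no subset of a nonnegative list has sum < k <= 0 and every partition is then great. — e.g. on countPartitionsFast2([1], 0): A returns 0, B returns 2
-- outside the precondition, e.g. on countPartitionsFast2([-1, 1], 0): A returns 0, B returns 4
import Mathlib
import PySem

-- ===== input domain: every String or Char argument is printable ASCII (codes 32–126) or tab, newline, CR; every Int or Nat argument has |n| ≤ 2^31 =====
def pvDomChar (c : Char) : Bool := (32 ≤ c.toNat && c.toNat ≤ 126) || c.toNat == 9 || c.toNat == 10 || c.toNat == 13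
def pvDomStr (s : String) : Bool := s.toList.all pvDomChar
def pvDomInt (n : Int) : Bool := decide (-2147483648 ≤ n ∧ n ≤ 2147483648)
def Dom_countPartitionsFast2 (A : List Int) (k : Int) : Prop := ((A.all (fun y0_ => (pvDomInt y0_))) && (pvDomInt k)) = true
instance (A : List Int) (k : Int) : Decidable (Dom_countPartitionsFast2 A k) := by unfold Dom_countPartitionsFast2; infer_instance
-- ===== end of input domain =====

-- B replaces A's in-place reverse knapsack sweep by a divide-and-conquer merge of
-- sparse subset-sum dictionaries with counts kept modulo 10^9+7 (alternative algorithm).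

-- ===== PORT A =====
def countPartitionsFast2 (A : List Int) (k : Int) : Int :=
  if A.sum < k * 2 then 0 else
  let md : Int := 10 ^ 9 + 7
  let dp : List Int := 1 :: List.replicate (k - 1).toNat 0
  let dp := A.foldl (fun d a =>
    (PySem.List.pyRange (k - 1 - a) (-1) (-1)).foldl
      (fun d i => PySem.List.pySetD d (i + a)
        (PySem.List.pyGetD d (i + a) 0 + PySem.List.pyGetD d i 0)) d) dp
  PySem.Int.mod (PySem.Int.mod (2 ^ A.length) md - dp.sum * 2) md

-- ===== PORT B =====
-- merge: the nested 'for s1,c1 in left.items(): for s2,c2 in right.items()' loops of Source B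
def pvMerge (cap p : Int) (L R : PySem.Dict Int Int) : PySem.Dict Int Int :=
  L.items.foldl (fun o q1 =>
    R.items.foldl (fun o q2 =>
      if q1.1 + q2.1 ≤ cap then
        o.insert (q1.1 + q2.1) (PySem.Int.mod (o.getD (q1.1 + q2.1) 0 + q1.2 * q2.2) p)
      else o) o) PySem.Dict.empty

-- dist(lo, hi) of Source B; the extra 'fuel' argument (called with fuel = hi - lo) only
-- makes the halving recursion structurally total, it never runs out on the real call.
-- A.getD lo 0 is Python's A[lo]: every call has lo < hi ≤ len(A), so it is in range.
-- the 'hi - lo <= 1' base branch of Source B's dist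
def pvDistBase (A : List Int) (cap p : Int) (lo hi : Nat) : PySem.Dict Int Int :=
  let d := if 0 ≤ cap then (PySem.Dict.empty.insert 0 1) else PySem.Dict.empty
  if lo < hi then
    let a := A.getD lo 0
    if 0 ≤ a ∧ a ≤ cap then d.insert a (PySem.Int.mod (d.getD a 0 + 1) p) else d
  else d

def pvDist (A : List Int) (cap p : Int) : Nat → Nat → Nat → PySem.Dict Int Int
  | 0, lo, hi => pvDistBase A cap p lo hi
  | fuel + 1, lo, hi =>
    if hi - lo ≤ 1 then pvDistBase A cap p lo hi
    else
      pvMerge cap p (pvDist A cap p fuel lo ((lo + hi) / 2))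
                    (pvDist A cap p fuel ((lo + hi) / 2) hi)

def countPartitionsFast2_alt (A : List Int) (k : Int) : Int :=
  if A.sum < k * 2 then 0 else
  let md : Int := 10 ^ 9 + 7
  let cap : Int := k - 1
  let bad : Int := PySem.Int.mod ((pvDist A cap md A.length 0 A.length).values.sum) md
  PySem.Int.mod (PySem.Int.mod (2 ^ A.length) md - 2 * bad) md

-- ===== PRECONDITION & SPEC =====
-- Pre_ excludes inputs that pass the sum guard while containing a negative element:
-- there A raises IndexError for k ≥ 1 (and for k ≤ 0 an accidental negative-index
-- wraparound on its one-cell dp decides the result); the problem's domain is positive.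
def Pre_countPartitionsFast2 (A : List Int) (k : Int) : Prop :=
  A.sum < k * 2 ∨ (∀ a ∈ A, 0 ≤ a)
instance (A : List Int) (k : Int) : Decidable (Pre_countPartitionsFast2 A k) := by
  unfold Pre_countPartitionsFast2; infer_instance

def pvWitness_countPartitionsFast2 : List Int × Int := ([1, 2, 3, 4], 3)

-- On k ≤ 0 with sum(A) ≥ 2k A's degenerate one-cell dp still counts the empty subset as
-- bad and A returns (2^n - 2) % mod, while B returns 2^n % mod, the intended count since
-- no subset of a nonnegative list has sum < k ≤ 0 and every partition is then great.
def D_countPartitionsFast2 (A : List Int) (k : Int) : Prop :=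
  k ≤ 0 ∧ ¬(A.sum < k * 2)
instance (A : List Int) (k : Int) : Decidable (D_countPartitionsFast2 A k) := by
  unfold D_countPartitionsFast2; infer_instance

def Spec_countPartitionsFast2 (A : List Int) (k : Int) (out : Int) : Prop :=
  ¬ D_countPartitionsFast2 A k → out = countPartitionsFast2_alt A k
instance (A : List Int) (k : Int) (out : Int) : Decidable (Spec_countPartitionsFast2 A k out) := by unfold Spec_countPartitionsFast2; infer_instance

def pvDiffWitness_countPartitionsFast2 : List Int × Int := ([1], 0)
def pvDiffWitnessOut_countPartitionsFast2 : Int × Int := (0, 2)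

-- ===== CLAIM (what is proved, stated in full; the proofs are below) =====
def Claim_unchanged_countPartitionsFast2 : Prop := ∀ (A : List Int) (k : Int), Dom_countPartitionsFast2 A k → Pre_countPartitionsFast2 A k → Spec_countPartitionsFast2 A k (countPartitionsFast2 A k)
def Claim_changed_countPartitionsFast2 : Prop := Dom_countPartitionsFast2 (pvDiffWitness_countPartitionsFast2.1) (pvDiffWitness_countPartitionsFast2.2) ∧ Pre_countPartitionsFast2 (pvDiffWitness_countPartitionsFast2.1) (pvDiffWitness_countPartitionsFast2.2) ∧ D_countPartitionsFast2 (pvDiffWitness_countPartitionsFast2.1) (pvDiffWitness_countPartitionsFast2.2) ∧ countPartitionsFast2 (pvDiffWitness_countPartitionsFast2.1) (pvDiffWitness_countPartitionsFast2.2) = pvDiffWitnessOut_countPartitionsFast2.1 ∧ countPartitionsFast2_alt (pvDiffWitness_countPartitionsFast2.1) (pvDiffWitness_countPartitionsFast2.2) = pvDiffWitnessOut_countPartitionsFast2.2 ∧ pvDiffWitnessOut_countPartitionsFast2.1 ≠ pvDiffWitnessOut_countPartitionsFast2.2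
def Claim_exact_countPartitionsFast2 : Prop := ∀ (A : List Int) (k : Int), Dom_countPartitionsFast2 A k → Pre_countPartitionsFast2 A k → D_countPartitionsFast2 A k → countPartitionsFast2 A k ≠ countPartitionsFast2_alt A k

-- ===== LEMMAS AND PROOFS =====

-- cntEQ l c = number of subsets of l with sum exactly c; cntLE l c = with sum ≤ c.
def cntEQ : List Int → Int → Int
  | [], c => if c = 0 then 1 else 0
  | a :: l, c => cntEQ l c + cntEQ l (c - a)

def cntLE : List Int → Int → Int
  | [], c => if 0 ≤ c then 1 else 0
  | a :: l, c => cntLE l c + cntLE l (c - a)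

lemma cntEQ_neg (l : List Int) (h : ∀ x ∈ l, 0 ≤ x) (c : Int) (hc : c < 0) : cntEQ l c = 0 := by
  induction l generalizing c with
  | nil => simp [cntEQ]; omega
  | cons a l ih =>
    have ha := h a (by simp)
    simp only [cntEQ]
    rw [ih (fun x hx => h x (by simp [hx])) c hc,
        ih (fun x hx => h x (by simp [hx])) (c - a) (by omega)]
    ring

lemma cntLE_neg (l : List Int) (h : ∀ x ∈ l, 0 ≤ x) (c : Int) (hc : c < 0) : cntLE l c = 0 := by
  induction l generalizing c with
  | nil => simp [cntLE]; omega
  | cons a l ih =>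
    have ha := h a (by simp)
    simp only [cntLE]
    rw [ih (fun x hx => h x (by simp [hx])) c hc,
        ih (fun x hx => h x (by simp [hx])) (c - a) (by omega)]
    ring

lemma cntEQ_concat (l : List Int) (a c : Int) :
    cntEQ (l ++ [a]) c = cntEQ l c + cntEQ l (c - a) := by
  induction l generalizing c with
  | nil => simp [cntEQ]
  | cons b l ih =>
    simp only [List.cons_append, cntEQ, ih]
    have : c - b - a = c - a - b := by ring
    rw [this]; ring

lemma cntLE_step (l : List Int) (c : Int) : cntLE l c = cntLE l (c - 1) + cntEQ l c := by
  induction l generalizing c with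
  | nil =>
    simp only [cntLE, cntEQ]
    by_cases h : c = 0
    · subst h; norm_num
    · by_cases h2 : 0 ≤ c
      · rw [if_pos h2, if_pos (by omega), if_neg h]; ring
      · rw [if_neg h2, if_neg (by omega), if_neg h]; ring
  | cons a l ih =>
    simp only [cntLE, cntEQ]
    rw [ih c, ih (c - a)]
    have : c - a - 1 = c - 1 - a := by ring
    rw [this]; ring

-- sum of exact counts over 0..n-1 is the cumulative count at n-1
lemma sum_map_range_cntEQ (l : List Int) (h : ∀ x ∈ l, 0 ≤ x) (n : Nat) :
    ((List.range n).map (fun i : Nat => cntEQ l (i : Int))).sum = cntLE l ((n : Int) - 1) := by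
  induction n with
  | zero => simp [cntLE_neg l h (-1) (by omega)]
  | succ n ih =>
    rw [List.range_succ, List.map_append, List.sum_append]
    simp only [List.map_cons, List.map_nil, List.sum_cons, List.sum_nil, ih]
    have h2 : ((n + 1 : Nat) : Int) - 1 = (n : Int) := by push_cast; ring
    rw [h2, cntLE_step l (n : Int)]
    have h3 : (n : Int) - 1 = ((n : Nat) : Int) - 1 := rfl
    ring

-- the in-place downward sweep of A, pointwise
lemma getD_set_int (l : List Int) (i : Nat) (v : Int) (j : Nat) :
    (l.set i v).getD j 0 = if i = j ∧ j < l.length then v else l.getD j 0 := by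
  simp [List.getD_eq_getElem?_getD, List.getElem?_set]
  split_ifs <;> simp_all

lemma sweepA (a m : Nat) : ∀ (dp : List Int), m + a ≤ dp.length →
    ((PySem.List.pyRange ((m : Int) - 1) (-1) (-1)).foldl
      (fun d i => PySem.List.pySetD d (i + (a : Int))
        (PySem.List.pyGetD d (i + (a : Int)) 0 + PySem.List.pyGetD d i 0)) dp).length = dp.length ∧
    ∀ j : Nat, ((PySem.List.pyRange ((m : Int) - 1) (-1) (-1)).foldl
      (fun d i => PySem.List.pySetD d (i + (a : Int))
        (PySem.List.pyGetD d (i + (a : Int)) 0 + PySem.List.pyGetD d i 0)) dp).getD j 0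
      = dp.getD j 0 + (if a ≤ j ∧ j < m + a then dp.getD (j - a) 0 else 0) := by
  induction m with
  | zero =>
    intro dp _
    rw [show ((0 : Nat) : Int) - 1 = -1 by norm_num,
        PySem.List.pyRange_neg_one_eq_nil (by norm_num)]
    refine ⟨rfl, fun j => ?_⟩
    simp only [List.foldl_nil]
    rw [if_neg (by omega)]; ring
  | succ m ih =>
    intro dp hlen
    rw [show ((m + 1 : Nat) : Int) - 1 = ((m : Nat) : Int) by push_cast; ring,
        PySem.List.pyRange_neg_one_cons (by omega), List.foldl_cons]
    have hcast : ((m : Nat) : Int) + ((a : Nat) : Int) = (((m + a : Nat) : Nat) : Int) := by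
      push_cast; ring
    rw [hcast, PySem.List.pySetD_natCast, PySem.List.pyGetD_natCast, PySem.List.pyGetD_natCast]
    set v : Int := dp.getD (m + a) 0 + dp.getD m 0 with hv
    obtain ⟨ihlen, ihget⟩ := ih (dp.set (m + a) v) (by simp; omega)
    refine ⟨by rw [ihlen]; simp, fun j => ?_⟩
    rw [ihget j, getD_set_int, getD_set_int]
    have hma : m + a < dp.length := by omega
    by_cases hj : j = m + a
    · subst hj
      rw [if_pos ⟨rfl, hma⟩, if_neg (show ¬((a : Nat) ≤ m + a ∧ m + a < m + a) by omega),
          if_pos (show (a : Nat) ≤ m + a ∧ m + a < m + 1 + a by omega)]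
      have he : m + a - a = m := by omega
      rw [he, hv]; ring
    · rw [if_neg (by omega)]
      by_cases hc : a ≤ j ∧ j < m + a
      · rw [if_pos hc, if_neg (show ¬(m + a = j - a ∧ j - a < dp.length) by omega),
            if_pos (show (a : Nat) ≤ j ∧ j < m + 1 + a by omega)]
      · rw [if_neg hc, if_neg (show ¬((a : Nat) ≤ j ∧ j < m + 1 + a) by omega)]

lemma stepA (k : Int) (hk : 1 ≤ k) (p : List Int) (hp : ∀ x ∈ p, 0 ≤ x) (a : Int) (ha : 0 ≤ a) :
    (PySem.List.pyRange (k - 1 - a) (-1) (-1)).foldl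
      (fun d i => PySem.List.pySetD d (i + a)
        (PySem.List.pyGetD d (i + a) 0 + PySem.List.pyGetD d i 0))
      ((List.range k.toNat).map (fun i : Nat => cntEQ p (i : Int)))
    = (List.range k.toNat).map (fun i : Nat => cntEQ (p ++ [a]) (i : Int)) := by
  by_cases hak : a ≤ k
  · have hc1 : a = ((a.toNat : Nat) : Int) := by omega
    rw [hc1]
    have hc2 : k - 1 - ((a.toNat : Nat) : Int) = (((k - a).toNat : Nat) : Int) - 1 := by omega
    rw [hc2]
    have hsum : (k - a).toNat + a.toNat = k.toNat := by omega
    obtain ⟨hlen, hget⟩ := sweepA a.toNat (k - a).toNat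
      ((List.range k.toNat).map (fun i : Nat => cntEQ p (i : Int))) (by simp; omega)
    apply List.ext_getElem (by rw [hlen]; simp)
    intro j hj1 hj2
    have hjk : j < k.toNat := by simpa using hj2
    have h1 : ∀ (l : List Int) (hj : j < l.length), l[j] = l.getD j 0 := by
      intro l hj; rw [List.getD_eq_getElem?_getD, List.getElem?_eq_getElem hj]; rfl
    rw [h1 _ hj1, h1 _ hj2, hget j,
        PySem.List.getD_map_range _ _ _ _ hjk,
        PySem.List.getD_map_range _ _ _ _ hjk, cntEQ_concat]
    by_cases hcase : a.toNat ≤ j ∧ j < (k - a).toNat + a.toNat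
    · rw [if_pos hcase, PySem.List.getD_map_range _ _ _ _ (by omega)]
      have he : ((j - a.toNat : Nat) : Int) = (j : Int) - ((a.toNat : Nat) : Int) := by omega
      rw [he]
    · rw [if_neg hcase,
          cntEQ_neg p hp ((j : Int) - ((a.toNat : Nat) : Int)) (by omega)]
  · rw [PySem.List.pyRange_neg_one_eq_nil (by omega), List.foldl_nil]
    apply List.map_congr_left
    intro j hj
    simp only [List.mem_range] at hj
    rw [cntEQ_concat, cntEQ_neg p hp ((j : Int) - a) (by omega)]
    ring

lemma foldA (k : Int) (hk : 1 ≤ k) : ∀ (l : List Int) (p : List Int),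
    (∀ x ∈ p, 0 ≤ x) → (∀ x ∈ l, 0 ≤ x) →
    l.foldl (fun d a =>
      (PySem.List.pyRange (k - 1 - a) (-1) (-1)).foldl
        (fun d i => PySem.List.pySetD d (i + a)
          (PySem.List.pyGetD d (i + a) 0 + PySem.List.pyGetD d i 0)) d)
      ((List.range k.toNat).map (fun i : Nat => cntEQ p (i : Int)))
    = (List.range k.toNat).map (fun i : Nat => cntEQ (p ++ l) (i : Int)) := by
  intro l
  induction l with
  | nil => intro p _ _; simp
  | cons a l ih =>
    intro p hp hl
    have ha : 0 ≤ a := hl a (by simp)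
    simp only [List.foldl_cons]
    rw [stepA k hk p hp a ha, ih (p ++ [a])
      (by intro x hx; rcases List.mem_append.1 hx with h | h
          · exact hp x h
          · simp at h; omega)
      (fun x hx => hl x (by simp [hx]))]
    simp

lemma initA (k : Int) (hk : 1 ≤ k) :
    (1 : Int) :: List.replicate (k - 1).toNat 0
      = (List.range k.toNat).map (fun i : Nat => cntEQ [] (i : Int)) := by
  have hn : k.toNat = (k - 1).toNat + 1 := by omega
  rw [hn, List.range_succ_eq_map, List.map_cons, List.map_map]
  have h1 : cntEQ [] (((0 : Nat) : Nat) : Int) = 1 := by simp [cntEQ]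
  rw [h1]
  congr 1
  symm
  rw [show List.replicate (k - 1).toNat (0 : Int) =
      List.replicate ((List.range (k - 1).toNat).map
        ((fun i : Nat => cntEQ [] (i : Int)) ∘ Nat.succ)).length (0 : Int) by simp]
  apply List.eq_replicate_of_mem
  intro b hb
  obtain ⟨i, -, hi⟩ := List.mem_map.1 hb
  simp only [Function.comp_apply, cntEQ] at hi
  rw [if_neg (by omega)] at hi
  exact hi.symm

-- ========== B-side machinery ==========

-- the per-pair contribution sums of the merge loops
def inSum (s1 c1 : Int) (Ri : List (Int × Int)) (s : Int) : Int :=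
  (Ri.map (fun q2 => if s1 + q2.1 = s then c1 * q2.2 else 0)).sum

def convSum (Li Ri : List (Int × Int)) (s : Int) : Int :=
  (Li.map (fun q1 => inSum q1.1 q1.2 Ri s)).sum

-- dict invariant tying a node's dict to the subset-sum counts of its slice
def DInv (cap p : Int) (d : PySem.Dict Int Int) (l : List Int) : Prop :=
  d.keys.Nodup ∧
  (∀ s ∈ d.keys, 0 ≤ s ∧ s ≤ cap ∧ d.getD s 0 = cntEQ l s % p) ∧
  (∀ s : Int, 0 ≤ s → s ≤ cap → s ∉ d.keys → cntEQ l s = 0)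

@[simp] lemma inSum_nil (s1 c1 s : Int) : inSum s1 c1 [] s = 0 := rfl

lemma inSum_cons (s1 c1 : Int) (q2 : Int × Int) (Ri : List (Int × Int)) (s : Int) :
    inSum s1 c1 (q2 :: Ri) s = (if s1 + q2.1 = s then c1 * q2.2 else 0) + inSum s1 c1 Ri s := by
  simp [inSum]

@[simp] lemma convSum_nil (Ri : List (Int × Int)) (s : Int) : convSum [] Ri s = 0 := rfl

lemma convSum_cons (q1 : Int × Int) (Li Ri : List (Int × Int)) (s : Int) :
    convSum (q1 :: Li) Ri s = inSum q1.1 q1.2 Ri s + convSum Li Ri s := by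
  simp [convSum]

lemma inner_fold_getD (cap p : Int) (hp : 0 < p) (s1 c1 : Int) (Ri : List (Int × Int)) :
    ∀ (o : PySem.Dict Int Int), (∀ t : Int, ∃ x, o.getD t 0 = x % p) → ∀ s : Int,
    (Ri.foldl (fun o q2 =>
        if s1 + q2.1 ≤ cap then
          o.insert (s1 + q2.1) (PySem.Int.mod (o.getD (s1 + q2.1) 0 + c1 * q2.2) p)
        else o) o).getD s 0
      = if s ≤ cap then (o.getD s 0 + inSum s1 c1 Ri s) % p else o.getD s 0 := by
  induction Ri with
  | nil =>
    intro o hred s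
    simp only [List.foldl_nil, inSum_nil, add_zero]
    split_ifs with hs
    · obtain ⟨x, hx⟩ := hred s
      rw [hx, Int.emod_emod_of_dvd _ dvd_rfl]
    · rfl
  | cons q2 Ri ih =>
    intro o hred s
    simp only [List.foldl_cons]
    by_cases ht : s1 + q2.1 ≤ cap
    · rw [if_pos ht]
      set o' := o.insert (s1 + q2.1) (PySem.Int.mod (o.getD (s1 + q2.1) 0 + c1 * q2.2) p) with ho'
      have hred' : ∀ t : Int, ∃ x, o'.getD t 0 = x % p := by
        intro t
        rw [ho', PySem.Dict.getD_insert]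
        split_ifs with h
        · exact ⟨_, PySem.Int.mod_eq_emod_of_pos hp⟩
        · exact hred t
      rw [ih o' hred' s]
      rw [inSum_cons]
      by_cases hs : s ≤ cap
      · rw [if_pos hs, if_pos hs, ho', PySem.Dict.getD_insert]
        by_cases he : s = s1 + q2.1
        · rw [if_pos he, if_pos (by omega), PySem.Int.mod_eq_emod_of_pos hp, Int.emod_add_emod,
              he]
          congr 1
          ring
        · rw [if_neg he, if_neg (by omega), zero_add]
      · rw [if_neg hs, if_neg hs, ho', PySem.Dict.getD_insert, if_neg (by omega)]
    · rw [if_neg ht, ih o hred s, inSum_cons]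
      by_cases hs : s ≤ cap
      · rw [if_pos hs, if_pos hs, if_neg (by omega), zero_add]
      · rw [if_neg hs, if_neg hs]

lemma inner_fold_red (cap p : Int) (hp : 0 < p) (s1 c1 : Int) (Ri : List (Int × Int))
    (o : PySem.Dict Int Int) (hred : ∀ t : Int, ∃ x, o.getD t 0 = x % p) :
    ∀ t : Int, ∃ x, (Ri.foldl (fun o q2 =>
        if s1 + q2.1 ≤ cap then
          o.insert (s1 + q2.1) (PySem.Int.mod (o.getD (s1 + q2.1) 0 + c1 * q2.2) p)
        else o) o).getD t 0 = x % p := by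
  intro t
  rw [inner_fold_getD cap p hp s1 c1 Ri o hred t]
  split_ifs with h
  · exact ⟨_, rfl⟩
  · exact hred t

lemma outer_fold_getD (cap p : Int) (hp : 0 < p) (Ri : List (Int × Int)) :
    ∀ (Li : List (Int × Int)) (o : PySem.Dict Int Int),
    (∀ t : Int, ∃ x, o.getD t 0 = x % p) → ∀ s : Int,
    (Li.foldl (fun o q1 =>
      Ri.foldl (fun o q2 =>
        if q1.1 + q2.1 ≤ cap then
          o.insert (q1.1 + q2.1) (PySem.Int.mod (o.getD (q1.1 + q2.1) 0 + q1.2 * q2.2) p)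
        else o) o) o).getD s 0
      = if s ≤ cap then (o.getD s 0 + convSum Li Ri s) % p else o.getD s 0 := by
  intro Li
  induction Li with
  | nil =>
    intro o hred s
    simp only [List.foldl_nil, convSum_nil, add_zero]
    split_ifs with hs
    · obtain ⟨x, hx⟩ := hred s
      rw [hx, Int.emod_emod_of_dvd _ dvd_rfl]
    · rfl
  | cons q1 Li ih =>
    intro o hred s
    simp only [List.foldl_cons]
    rw [ih _ (inner_fold_red cap p hp q1.1 q1.2 Ri o hred), convSum_cons]
    by_cases hs : s ≤ cap
    · rw [if_pos hs, if_pos hs, inner_fold_getD cap p hp q1.1 q1.2 Ri o hred s, if_pos hs,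
          Int.emod_add_emod]
      ring_nf
    · rw [if_neg hs, if_neg hs, inner_fold_getD cap p hp q1.1 q1.2 Ri o hred s, if_neg hs]

lemma inner_fold_mem_keys (cap p : Int) (s1 c1 : Int) (Ri : List (Int × Int)) :
    ∀ (o : PySem.Dict Int Int) (s : Int),
    (s ∈ (Ri.foldl (fun o q2 =>
        if s1 + q2.1 ≤ cap then
          o.insert (s1 + q2.1) (PySem.Int.mod (o.getD (s1 + q2.1) 0 + c1 * q2.2) p)
        else o) o).keys)
      ↔ s ∈ o.keys ∨ (s ≤ cap ∧ ∃ q2 ∈ Ri, s1 + q2.1 = s) := by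
  induction Ri with
  | nil => intro o s; simp
  | cons q2 Ri ih =>
    intro o s
    simp only [List.foldl_cons]
    by_cases ht : s1 + q2.1 ≤ cap
    · rw [if_pos ht, ih]
      rw [PySem.Dict.mem_keys_insert]
      constructor
      · rintro ((h | h) | h)
        · subst h; exact Or.inr ⟨ht, q2, by simp⟩
        · exact Or.inl h
        · obtain ⟨hs, q, hq, he⟩ := h
          exact Or.inr ⟨hs, q, by simp [hq], he⟩
      · rintro (h | ⟨hs, q, hq, he⟩)
        · exact Or.inl (Or.inr h)
        · rcases List.mem_cons.1 hq with h | h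
          · subst h; exact Or.inl (Or.inl he.symm)
          · exact Or.inr ⟨hs, q, h, he⟩
    · rw [if_neg ht, ih]
      constructor
      · rintro (h | ⟨hs, q, hq, he⟩)
        · exact Or.inl h
        · exact Or.inr ⟨hs, q, by simp [hq], he⟩
      · rintro (h | ⟨hs, q, hq, he⟩)
        · exact Or.inl h
        · rcases List.mem_cons.1 hq with h | h
          · subst h; omega
          · exact Or.inr ⟨hs, q, h, he⟩

lemma outer_fold_mem_keys (cap p : Int) (Ri : List (Int × Int)) :
    ∀ (Li : List (Int × Int)) (o : PySem.Dict Int Int) (s : Int),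
    (s ∈ (Li.foldl (fun o q1 =>
      Ri.foldl (fun o q2 =>
        if q1.1 + q2.1 ≤ cap then
          o.insert (q1.1 + q2.1) (PySem.Int.mod (o.getD (q1.1 + q2.1) 0 + q1.2 * q2.2) p)
        else o) o) o).keys)
      ↔ s ∈ o.keys ∨ (s ≤ cap ∧ ∃ q1 ∈ Li, ∃ q2 ∈ Ri, q1.1 + q2.1 = s) := by
  intro Li
  induction Li with
  | nil => intro o s; simp
  | cons q1 Li ih =>
    intro o s
    simp only [List.foldl_cons]
    rw [ih, inner_fold_mem_keys]
    constructor
    · rintro ((h | ⟨hs, q, hq, he⟩) | ⟨hs, q1', hq1, q2', hq2, he⟩)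
      · exact Or.inl h
      · exact Or.inr ⟨hs, q1, by simp, q, hq, he⟩
      · exact Or.inr ⟨hs, q1', by simp [hq1], q2', hq2, he⟩
    · rintro (h | ⟨hs, q1', hq1, q2', hq2, he⟩)
      · exact Or.inl (Or.inl h)
      · rcases List.mem_cons.1 hq1 with h | h
        · subst h; exact Or.inl (Or.inr ⟨hs, q2', hq2, he⟩)
        · exact Or.inr ⟨hs, q1', h, q2', hq2, he⟩

lemma inner_fold_nodup (cap p : Int) (s1 c1 : Int) (Ri : List (Int × Int)) :
    ∀ (o : PySem.Dict Int Int), o.keys.Nodup →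
    (Ri.foldl (fun o q2 =>
        if s1 + q2.1 ≤ cap then
          o.insert (s1 + q2.1) (PySem.Int.mod (o.getD (s1 + q2.1) 0 + c1 * q2.2) p)
        else o) o).keys.Nodup := by
  induction Ri with
  | nil => intro o h; simpa using h
  | cons q2 Ri ih =>
    intro o h
    simp only [List.foldl_cons]
    split_ifs with ht
    · exact ih _ (PySem.Dict.nodup_keys_insert _ _ _ h)
    · exact ih _ h

lemma outer_fold_nodup (cap p : Int) (Ri : List (Int × Int)) :
    ∀ (Li : List (Int × Int)) (o : PySem.Dict Int Int), o.keys.Nodup →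
    (Li.foldl (fun o q1 =>
      Ri.foldl (fun o q2 =>
        if q1.1 + q2.1 ≤ cap then
          o.insert (q1.1 + q2.1) (PySem.Int.mod (o.getD (q1.1 + q2.1) 0 + q1.2 * q2.2) p)
        else o) o) o).keys.Nodup := by
  intro Li
  induction Li with
  | nil => intro o h; simpa using h
  | cons q1 Li ih =>
    intro o h
    simp only [List.foldl_cons]
    exact ih _ (inner_fold_nodup cap p q1.1 q1.2 Ri o h)

lemma merge_getD (cap p : Int) (hp : 0 < p) (Li Ri : List (Int × Int)) (s : Int) :
    (Li.foldl (fun o q1 =>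
      Ri.foldl (fun o q2 =>
        if q1.1 + q2.1 ≤ cap then
          o.insert (q1.1 + q2.1) (PySem.Int.mod (o.getD (q1.1 + q2.1) 0 + q1.2 * q2.2) p)
        else o) o) PySem.Dict.empty).getD s 0
    = if s ≤ cap then (convSum Li Ri s) % p else 0 := by
  rw [outer_fold_getD cap p hp Ri Li PySem.Dict.empty (fun t => ⟨0, by simp⟩) s]
  simp

lemma merge_mem_keys (cap p : Int) (Li Ri : List (Int × Int)) (s : Int) :
    (s ∈ (Li.foldl (fun o q1 =>
      Ri.foldl (fun o q2 =>
        if q1.1 + q2.1 ≤ cap then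
          o.insert (q1.1 + q2.1) (PySem.Int.mod (o.getD (q1.1 + q2.1) 0 + q1.2 * q2.2) p)
        else o) o) PySem.Dict.empty).keys)
    ↔ (s ≤ cap ∧ ∃ q1 ∈ Li, ∃ q2 ∈ Ri, q1.1 + q2.1 = s) := by
  rw [outer_fold_mem_keys cap p Ri Li PySem.Dict.empty s]
  simp

lemma merge_nodup (cap p : Int) (Li Ri : List (Int × Int)) :
    (Li.foldl (fun o q1 =>
      Ri.foldl (fun o q2 =>
        if q1.1 + q2.1 ≤ cap then
          o.insert (q1.1 + q2.1) (PySem.Int.mod (o.getD (q1.1 + q2.1) 0 + q1.2 * q2.2) p)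
        else o) o) PySem.Dict.empty).keys.Nodup := by
  exact outer_fold_nodup cap p Ri Li PySem.Dict.empty (by simp)

-- convolution identity for exact counts
lemma cntEQ_append_Icc (l1 l2 : List Int) (h1 : ∀ x ∈ l1, 0 ≤ x) (h2 : ∀ x ∈ l2, 0 ≤ x)
    (s : Int) (hs : 0 ≤ s) :
    cntEQ (l1 ++ l2) s = ∑ t ∈ Finset.Icc 0 s, cntEQ l1 t * cntEQ l2 (s - t) := by
  induction l1 generalizing s with
  | nil =>
    simp only [List.nil_append]
    rw [Finset.sum_eq_single_of_mem 0 (by simp [hs])]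
    · simp [cntEQ]
    · intro t _ ht
      simp [cntEQ, ht]
  | cons a l1 ih =>
    have ha : 0 ≤ a := h1 a (by simp)
    have h1' : ∀ x ∈ l1, 0 ≤ x := fun x hx => h1 x (by simp [hx])
    simp only [List.cons_append, cntEQ]
    have step : ∀ t : Int, (cntEQ l1 t + cntEQ l1 (t - a)) * cntEQ l2 (s - t)
        = cntEQ l1 t * cntEQ l2 (s - t) + cntEQ l1 (t - a) * cntEQ l2 (s - t) := by
      intro t; ring
    simp only [step, Finset.sum_add_distrib]
    rw [ih h1' s hs]
    congr 1
    by_cases hsa : 0 ≤ s - a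
    · -- restrict to Icc a s, reindex by +a, apply ih at s - a
      rw [ih h1' (s - a) hsa]
      rw [← Finset.sum_subset (Finset.Icc_subset_Icc ha (le_refl s))
            (by
              intro t ht hnt
              simp only [Finset.mem_Icc] at ht hnt
              rw [cntEQ_neg l1 h1' (t - a) (by omega), zero_mul])]
      rw [show Finset.Icc a s = Finset.map (addLeftEmbedding a) (Finset.Icc 0 (s - a)) by
            rw [Finset.map_add_left_Icc]; congr 1 <;> ring]
      rw [Finset.sum_map]
      refine Finset.sum_congr rfl (fun u _ => ?_)
      simp only [addLeftEmbedding_apply]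
      rw [show a + u - a = u by ring, show s - (a + u) = s - a - u by ring]
    · rw [cntEQ_neg (l1 ++ l2) (by
        intro x hx
        rcases List.mem_append.1 hx with h | h
        · exact h1' x h
        · exact h2 x h) (s - a) (by omega)]
      symm
      apply Finset.sum_eq_zero
      intro t ht
      simp only [Finset.mem_Icc] at ht
      rw [cntEQ_neg l1 h1' (t - a) (by omega), zero_mul]

lemma list_sum_modeq {α : Type} (p : Int) (L : List α) (f g : α → Int)
    (h : ∀ q ∈ L, Int.ModEq p (f q) (g q)) :
    Int.ModEq p ((L.map f).sum) ((L.map g).sum) := by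
  induction L with
  | nil => rfl
  | cons q L ih =>
    simp only [List.map_cons, List.sum_cons]
    exact (h q (by simp)).add (ih (fun q hq => h q (by simp [hq])))

lemma sum_map_pick_zero (L : List (Int × Int)) (c : Int) (f : Int × Int → Int)
    (h : c ∉ L.map Prod.fst) :
    (L.map (fun q => if q.1 = c then f q else 0)).sum = 0 := by
  induction L with
  | nil => rfl
  | cons q L ih =>
    simp only [List.map_cons] at h
    simp only [List.map_cons, List.sum_cons]
    rw [if_neg (fun he => h (by rw [← he]; exact List.mem_cons_self ..)),
        ih (fun hm => h (List.mem_cons_of_mem _ hm))]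
    ring

lemma sum_map_pick (L : List (Int × Int)) (hnd : (L.map Prod.fst).Nodup) (c : Int)
    (f : Int × Int → Int) (q : Int × Int) (hq : q ∈ L) (hc : q.1 = c) :
    (L.map (fun q => if q.1 = c then f q else 0)).sum = f q := by
  induction L with
  | nil => simp at hq
  | cons q' L ih =>
    simp only [List.map_cons] at hnd
    obtain ⟨hni, hnd2⟩ := List.nodup_cons.1 hnd
    simp only [List.map_cons, List.sum_cons]
    rcases List.mem_cons.1 hq with he | hm
    · subst he
      rw [if_pos hc, sum_map_pick_zero L c f (by rw [← hc]; exact hni), add_zero]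
    · rw [if_neg (fun he => hni (by rw [he, ← hc]; exact List.mem_map.2 ⟨q, hm, rfl⟩)),
          ih hnd2 hm]
      ring

lemma convSum_modeq (cap p : Int) (L R : PySem.Dict Int Int) (l1 l2 : List Int)
    (hL : DInv cap p L l1) (hR : DInv cap p R l2)
    (h1 : ∀ x ∈ l1, 0 ≤ x) (h2 : ∀ x ∈ l2, 0 ≤ x)
    (s : Int) (hs0 : 0 ≤ s) (hscap : s ≤ cap) :
    Int.ModEq p (convSum L.items R.items s) (cntEQ (l1 ++ l2) s) := by
  obtain ⟨hLnd, hLk, hLz⟩ := hL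
  obtain ⟨hRnd, hRk, hRz⟩ := hR
  have hRnd' : (R.items.map Prod.fst).Nodup := hRnd
  have step1 : Int.ModEq p (convSum L.items R.items s)
      ((L.items.map (fun q1 => cntEQ l1 q1.1 * cntEQ l2 (s - q1.1))).sum) := by
    apply list_sum_modeq
    intro q1 hq1
    have hk1 : q1.1 ∈ L.keys := PySem.Dict.mem_keys_of_mem_items L hq1
    obtain ⟨hq10, hq1cap, _⟩ := hLk q1.1 hk1
    have hv1 : q1.2 = cntEQ l1 q1.1 % p := by
      have := PySem.Dict.getD_of_mem_items L
        (show (q1.1, q1.2) ∈ L.items by simpa using hq1) hLnd 0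
      rw [← this]; exact (hLk q1.1 hk1).2.2
    have hin : inSum q1.1 q1.2 R.items s
        = (R.items.map (fun q2 => if q2.1 = s - q1.1 then q1.2 * q2.2 else 0)).sum := by
      unfold inSum
      congr 1
      apply List.map_congr_left
      intro q2 _
      by_cases h : q1.1 + q2.1 = s
      · rw [if_pos h, if_pos (by omega)]
      · rw [if_neg h, if_neg (by omega)]
    rw [hin]
    by_cases hmem : (s - q1.1) ∈ R.keys
    · obtain ⟨q2, hq2, hq2e⟩ : ∃ q2 ∈ R.items, q2.1 = s - q1.1 := by
        simpa only [PySem.Dict.keys, List.mem_map] using hmem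
      rw [sum_map_pick R.items hRnd' (s - q1.1) _ q2 hq2 hq2e]
      have hv2 : q2.2 = cntEQ l2 (s - q1.1) % p := by
        have hgd := PySem.Dict.getD_of_mem_items R
          (show (q2.1, q2.2) ∈ R.items by simpa using hq2) hRnd 0
        rw [← hgd, hq2e]
        exact (hRk (s - q1.1) hmem).2.2
      rw [hv1, hv2]
      exact Int.ModEq.mul (Int.emod_emod_of_dvd _ dvd_rfl) (Int.emod_emod_of_dvd _ dvd_rfl)
    · rw [sum_map_pick_zero R.items (s - q1.1) _ (by
        intro hmm
        exact hmem (by simpa only [PySem.Dict.keys] using hmm))]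
      have hz2 : cntEQ l2 (s - q1.1) = 0 := by
        by_cases hge : 0 ≤ s - q1.1
        · exact hRz (s - q1.1) hge (by omega) hmem
        · exact cntEQ_neg l2 h2 (s - q1.1) (by omega)
      rw [hz2, mul_zero]
  have step2 : (L.items.map (fun q1 => cntEQ l1 q1.1 * cntEQ l2 (s - q1.1))).sum
      = ((L.keys).map (fun t => cntEQ l1 t * cntEQ l2 (s - t))).sum := by
    simp only [PySem.Dict.keys, List.map_map]
    rfl
  have step3 : ((L.keys).map (fun t => cntEQ l1 t * cntEQ l2 (s - t))).sum
      = ∑ t ∈ L.keys.toFinset, cntEQ l1 t * cntEQ l2 (s - t) := by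
    rw [List.sum_toFinset _ hLnd]
  have step4 : ∑ t ∈ L.keys.toFinset, cntEQ l1 t * cntEQ l2 (s - t)
      = ∑ t ∈ Finset.Icc 0 s, cntEQ l1 t * cntEQ l2 (s - t) := by
    have e1 : ∑ t ∈ L.keys.toFinset, cntEQ l1 t * cntEQ l2 (s - t)
        = ∑ t ∈ L.keys.toFinset ∪ Finset.Icc 0 s, cntEQ l1 t * cntEQ l2 (s - t) :=
      Finset.sum_subset Finset.subset_union_left
      (by
        intro t ht hnt
        rcases Finset.mem_union.1 ht with h | h
        · exact absurd h hnt
        · simp only [Finset.mem_Icc] at h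
          rw [hLz t h.1 (by omega) (by
            intro hk
            exact hnt (List.mem_toFinset.2 hk)), zero_mul])
    have e2 : ∑ t ∈ Finset.Icc 0 s, cntEQ l1 t * cntEQ l2 (s - t)
        = ∑ t ∈ L.keys.toFinset ∪ Finset.Icc 0 s, cntEQ l1 t * cntEQ l2 (s - t) :=
      Finset.sum_subset Finset.subset_union_right
      (by
        intro t ht hnt
        rcases Finset.mem_union.1 ht with h | h
        · obtain ⟨ht0, htcap, _⟩ := hLk t (List.mem_toFinset.1 h)
          simp only [Finset.mem_Icc] at hnt
          rw [cntEQ_neg l2 h2 (s - t) (by omega), mul_zero]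
        · exact absurd h hnt)
    exact e1.trans e2.symm
  rw [step2, step3, step4] at step1
  exact step1.trans (by rw [← cntEQ_append_Icc l1 l2 h1 h2 s hs0])

lemma merge_inv (cap p : Int) (hp : 0 < p) (L R : PySem.Dict Int Int) (l1 l2 : List Int)
    (hL : DInv cap p L l1) (hR : DInv cap p R l2)
    (h1 : ∀ x ∈ l1, 0 ≤ x) (h2 : ∀ x ∈ l2, 0 ≤ x) :
    DInv cap p (pvMerge cap p L R) (l1 ++ l2) := by
  unfold pvMerge
  refine ⟨merge_nodup cap p L.items R.items, ?_, ?_⟩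
  · intro s hs
    obtain ⟨hscap, q1, hq1, q2, hq2, he⟩ := (merge_mem_keys cap p L.items R.items s).1 hs
    have h01 : 0 ≤ q1.1 := (hL.2.1 q1.1 (PySem.Dict.mem_keys_of_mem_items L hq1)).1
    have h02 : 0 ≤ q2.1 := (hR.2.1 q2.1 (PySem.Dict.mem_keys_of_mem_items R hq2)).1
    refine ⟨by omega, hscap, ?_⟩
    rw [merge_getD cap p hp L.items R.items s, if_pos hscap]
    exact convSum_modeq cap p L R l1 l2 hL hR h1 h2 s (by omega) hscap
  · intro s hs0 hscap hnk
    rw [cntEQ_append_Icc l1 l2 h1 h2 s hs0]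
    apply Finset.sum_eq_zero
    intro t ht
    simp only [Finset.mem_Icc] at ht
    by_cases hz1 : cntEQ l1 t = 0
    · rw [hz1, zero_mul]
    by_cases hz2 : cntEQ l2 (s - t) = 0
    · rw [hz2, mul_zero]
    exfalso
    have hk1 : t ∈ L.keys := by
      by_contra hk
      exact hz1 (hL.2.2 t ht.1 (by omega) hk)
    have hst0 : 0 ≤ s - t := by
      by_contra hlt
      exact hz2 (cntEQ_neg l2 h2 (s - t) (by omega))
    have hk2 : (s - t) ∈ R.keys := by
      by_contra hk
      exact hz2 (hR.2.2 (s - t) hst0 (by omega) hk)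
    obtain ⟨q1, hq1, hq1e⟩ : ∃ q1 ∈ L.items, q1.1 = t := by
      simpa only [PySem.Dict.keys, List.mem_map] using hk1
    obtain ⟨q2, hq2, hq2e⟩ : ∃ q2 ∈ R.items, q2.1 = s - t := by
      simpa only [PySem.Dict.keys, List.mem_map] using hk2
    exact hnk ((merge_mem_keys cap p L.items R.items s).2
      ⟨hscap, q1, hq1, q2, hq2, by omega⟩)

lemma slice_one (A : List Int) (lo : Nat) (h : lo < A.length) :
    (A.drop lo).take 1 = [A.getD lo 0] := by
  rw [List.drop_eq_getElem_cons h, List.take_succ_cons, List.take_zero,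
      List.getD_eq_getElem?_getD, List.getElem?_eq_getElem h]
  rfl

lemma slice_split (A : List Int) (lo mid hi : Nat) (h1 : lo ≤ mid) (h2 : mid ≤ hi) :
    (A.drop lo).take (hi - lo)
      = (A.drop lo).take (mid - lo) ++ (A.drop mid).take (hi - mid) := by
  rw [show hi - lo = (mid - lo) + (hi - mid) by omega, List.take_add, List.drop_drop,
      show lo + (mid - lo) = mid by omega]

lemma empty_inv (cap p : Int) (hp : 1 < p) :
    DInv cap p (if 0 ≤ cap then (PySem.Dict.empty.insert 0 1) else PySem.Dict.empty) [] := by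
  split_ifs with hcap
  · refine ⟨by rw [show (PySem.Dict.empty.insert (0:Int) (1:Int)).keys = [0] by decide]; simp, ?_, ?_⟩
    · intro s hs
      rw [show (PySem.Dict.empty.insert (0:Int) (1:Int)).keys = [0] by decide] at hs
      have hs0 : s = 0 := by simpa using hs
      subst hs0
      refine ⟨le_refl 0, hcap, ?_⟩
      rw [PySem.Dict.getD_insert_self _ _ _ _]
      simp only [cntEQ]
      exact (Int.emod_eq_of_lt (by norm_num) hp).symm
    · intro s hs0 hscap hsk
      rw [show (PySem.Dict.empty.insert (0:Int) (1:Int)).keys = [0] by decide] at hsk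
      have hsne : s ≠ 0 := by intro h; exact hsk (by simp [h])
      simp [cntEQ, hsne]
  · refine ⟨by rw [show (PySem.Dict.empty : PySem.Dict Int Int).keys = [] by decide]; simp,
      ?_, ?_⟩
    · intro s hs
      rw [show (PySem.Dict.empty : PySem.Dict Int Int).keys = [] by decide] at hs
      simp at hs
    · intro s hs0 hscap _
      omega

lemma leaf_inv (cap p : Int) (hp : 1 < p) (a : Int) (ha : 0 ≤ a) :
    DInv cap p
      (if 0 ≤ a ∧ a ≤ cap then
        (if 0 ≤ cap then (PySem.Dict.empty.insert 0 1) else PySem.Dict.empty).insert a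
          (PySem.Int.mod
            ((if 0 ≤ cap then (PySem.Dict.empty.insert 0 1) else PySem.Dict.empty).getD a 0 + 1) p)
      else (if 0 ≤ cap then (PySem.Dict.empty.insert 0 1) else PySem.Dict.empty)) [a] := by
  by_cases hcond : 0 ≤ a ∧ a ≤ cap
  · have hcap : 0 ≤ cap := by omega
    rw [if_pos hcond, if_pos hcap]
    by_cases ha0 : a = 0
    · subst ha0
      have hgd : (PySem.Dict.empty.insert (0:Int) (1:Int)).getD 0 0 = 1 := by decide
      rw [hgd, PySem.Dict.insert_insert_self]
      refine ⟨by rw [show ∀ v : Int, (PySem.Dict.empty.insert (0:Int) v).keys = [0] from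
          fun v => rfl]; simp, ?_, ?_⟩
      · intro s hs
        rw [show ∀ v : Int, (PySem.Dict.empty.insert (0:Int) v).keys = [0] from
          fun v => rfl] at hs
        have hs0 : s = 0 := by simpa using hs
        subst hs0
        refine ⟨le_refl 0, hcap, ?_⟩
        rw [PySem.Dict.getD_insert_self _ _ _ _, PySem.Int.mod_eq_emod_of_pos (by omega)]
        norm_num [cntEQ]
      · intro s hs0 hscap hsk
        rw [show ∀ v : Int, (PySem.Dict.empty.insert (0:Int) v).keys = [0] from
          fun v => rfl] at hsk
        have hsne : s ≠ 0 := by intro h; exact hsk (by simp [h])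
        simp [cntEQ, hsne]
    · have hnc : (PySem.Dict.empty.insert (0:Int) (1:Int)).contains a = false := by
        rw [PySem.Dict.contains_insert]
        simp [ha0, PySem.Dict.contains_empty]
      have hgda : (PySem.Dict.empty.insert (0:Int) (1:Int)).getD a 0 = 0 := by
        rw [PySem.Dict.getD_insert, if_neg ha0]
        exact PySem.Dict.getD_empty _ _
      have hkeys : ((PySem.Dict.empty.insert (0:Int) (1:Int)).insert a
          (PySem.Int.mod ((PySem.Dict.empty.insert (0:Int) (1:Int)).getD a 0 + 1) p)).keys
          = [0, a] := by
        rw [PySem.Dict.keys_insert_of_not_contains _ _ hnc,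
            show (PySem.Dict.empty.insert (0:Int) (1:Int)).keys = [0] by decide]
        rfl
      refine ⟨by rw [hkeys]; simp [Ne.symm ha0], ?_, ?_⟩
      · intro s hs
        rw [hkeys] at hs
        have : s = 0 ∨ s = a := by simpa using hs
        rcases this with h | h
        · subst h
          refine ⟨le_refl 0, hcap, ?_⟩
          rw [PySem.Dict.getD_insert, if_neg (Ne.symm ha0), PySem.Dict.getD_insert_self _ _ _ _]
          have hc : cntEQ [a] 0 = 1 := by
            simp only [cntEQ]
            rw [if_neg (show (0 : Int) - a ≠ 0 by omega)]
            simp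
          rw [hc]
          exact (Int.emod_eq_of_lt (by norm_num) hp).symm
        · rw [h]
          refine ⟨ha, hcond.2, ?_⟩
          rw [PySem.Dict.getD_insert_self _ _ _ _, hgda,
              PySem.Int.mod_eq_emod_of_pos (by omega)]
          have hc : cntEQ [a] a = 1 := by
            simp only [cntEQ]
            rw [if_neg ha0, if_pos (show a - a = 0 by ring)]
            simp
          rw [hc]
          norm_num
      · intro s hs0 hscap hsk
        rw [hkeys] at hsk
        have hsne : s ≠ 0 := by intro h; exact hsk (by simp [h])
        have hsna : s ≠ a := by intro h; exact hsk (by simp [h])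
        simp only [cntEQ]
        rw [if_neg hsne, if_neg (show s - a ≠ 0 from fun h => hsna (by omega))]
        ring
  · rw [if_neg hcond]
    have hacap : cap < a := by omega
    split_ifs with hcap
    · refine ⟨by rw [show (PySem.Dict.empty.insert (0:Int) (1:Int)).keys = [0] by decide]; simp,
        ?_, ?_⟩
      · intro s hs
        rw [show (PySem.Dict.empty.insert (0:Int) (1:Int)).keys = [0] by decide] at hs
        have hs0 : s = 0 := by simpa using hs
        subst hs0
        refine ⟨le_refl 0, hcap, ?_⟩
        rw [PySem.Dict.getD_insert_self _ _ _ _]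
        have hc : cntEQ [a] 0 = 1 := by
          simp only [cntEQ]
          rw [if_neg (show (0 : Int) - a ≠ 0 by omega)]
          simp
        rw [hc]
        exact (Int.emod_eq_of_lt (by norm_num) hp).symm
      · intro s hs0 hscap hsk
        rw [show (PySem.Dict.empty.insert (0:Int) (1:Int)).keys = [0] by decide] at hsk
        have hsne : s ≠ 0 := by intro h; exact hsk (by simp [h])
        simp only [cntEQ]
        rw [if_neg hsne, if_neg (show s - a ≠ 0 by omega)]
        ring
    · refine ⟨by rw [show (PySem.Dict.empty : PySem.Dict Int Int).keys = [] by decide]; simp,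
        ?_, ?_⟩
      · intro s hs
        rw [show (PySem.Dict.empty : PySem.Dict Int Int).keys = [] by decide] at hs
        simp at hs
      · intro s hs0 hscap _
        omega

lemma base_inv (A : List Int) (cap p : Int) (hp : 1 < p) (hA : ∀ x ∈ A, 0 ≤ x)
    (lo hi : Nat) (hlh : lo ≤ hi) (hhi : hi ≤ A.length) (h1 : hi - lo ≤ 1) :
    DInv cap p (pvDistBase A cap p lo hi) ((A.drop lo).take (hi - lo)) := by
  unfold pvDistBase
  by_cases hlt : lo < hi
  · have hlen : lo < A.length := by omega
    have hsl : (A.drop lo).take (hi - lo) = [A.getD lo 0] := by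
      rw [show hi - lo = 1 by omega]; exact slice_one A lo hlen
    have ha : 0 ≤ A.getD lo 0 := by
      rw [List.getD_eq_getElem?_getD, List.getElem?_eq_getElem hlen]
      exact hA _ (List.getElem_mem hlen)
    rw [hsl]
    simp only [if_pos hlt]
    exact leaf_inv cap p hp (A.getD lo 0) ha
  · have hsl : hi - lo = 0 := by omega
    rw [hsl]
    simp only [List.take_zero, if_neg hlt]
    exact empty_inv cap p hp

lemma pvDist_inv (A : List Int) (cap p : Int) (hp : 1 < p) (hA : ∀ x ∈ A, 0 ≤ x) :
    ∀ (fuel lo hi : Nat), lo ≤ hi → hi ≤ A.length → hi - lo ≤ fuel →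
    DInv cap p (pvDist A cap p fuel lo hi) ((A.drop lo).take (hi - lo)) := by
  intro fuel
  induction fuel with
  | zero =>
    intro lo hi h1 h2 h3
    exact base_inv A cap p hp hA lo hi h1 h2 (by omega)
  | succ fuel ih =>
    intro lo hi h1 h2 h3
    show DInv cap p (pvDist A cap p (fuel + 1) lo hi) _
    rw [pvDist]
    by_cases hb : hi - lo ≤ 1
    · rw [if_pos hb]
      exact base_inv A cap p hp hA lo hi h1 h2 hb
    · rw [if_neg hb]
      have hmid1 : lo < (lo + hi) / 2 := by omega
      have hmid2 : (lo + hi) / 2 < hi := by omega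
      have hsplit := slice_split A lo ((lo + hi) / 2) hi (by omega) (by omega)
      rw [hsplit]
      have hsub : ∀ m n : Nat, m ≤ n → n ≤ A.length →
          ∀ x ∈ (A.drop m).take (n - m), 0 ≤ x := by
        intro m n _ _ x hx
        exact hA x (List.mem_of_mem_drop (List.mem_of_mem_take hx))
      exact merge_inv cap p (by omega) _ _ _ _
        (ih lo ((lo + hi) / 2) (by omega) (by omega) (by omega))
        (ih ((lo + hi) / 2) hi (by omega) (by omega) (by omega))
        (hsub lo ((lo + hi) / 2) (by omega) (by omega))
        (hsub ((lo + hi) / 2) hi (by omega) (by omega))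

lemma sum_Icc_cntEQ (l : List Int) (h : ∀ x ∈ l, 0 ≤ x) :
    ∀ c : Int, 0 ≤ c → (∑ t ∈ Finset.Icc 0 c, cntEQ l t) = cntLE l c := by
  intro c hc
  induction c, hc using Int.le_induction with
  | base =>
    rw [show Finset.Icc (0 : Int) 0 = {0} by rfl, Finset.sum_singleton,
        cntLE_step l 0, cntLE_neg l h (0 - 1) (by omega), zero_add]
  | succ n hn ih =>
    have hins : Finset.Icc (0 : Int) (n + 1) = insert (n + 1) (Finset.Icc 0 n) := by
      ext t
      simp only [Finset.mem_Icc, Finset.mem_insert]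
      omega
    rw [hins, Finset.sum_insert (by simp), ih, cntLE_step l (n + 1),
        show n + 1 - 1 = n by ring]
    ring

lemma values_sum_mod (cap p : Int) (_hp : 0 < p) (d : PySem.Dict Int Int) (l : List Int)
    (hd : DInv cap p d l) (h : ∀ x ∈ l, 0 ≤ x) (hcap : 0 ≤ cap) :
    d.values.sum % p = cntLE l cap % p := by
  obtain ⟨hnd, hk, hz⟩ := hd
  rw [PySem.Dict.values_eq_map_keys d hnd 0]
  have e1 : (d.keys.map (fun t => d.getD t 0)).sum
      = (d.keys.map (fun t => cntEQ l t % p)).sum := by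
    congr 1
    exact List.map_congr_left (fun t ht => (hk t ht).2.2)
  rw [e1]
  have e2 : Int.ModEq p ((d.keys.map (fun t => cntEQ l t % p)).sum)
      ((d.keys.map (fun t => cntEQ l t)).sum) :=
    list_sum_modeq p d.keys _ _ (fun t _ => Int.emod_emod_of_dvd _ dvd_rfl)
  have e3 : ((d.keys.map (fun t => cntEQ l t)).sum) = cntLE l cap := by
    rw [← List.sum_toFinset _ hnd]
    have e4 : ∑ t ∈ d.keys.toFinset, cntEQ l t = ∑ t ∈ Finset.Icc 0 cap, cntEQ l t :=
      Finset.sum_subset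
        (by
          intro t ht
          obtain ⟨h1, h2, _⟩ := hk t (List.mem_toFinset.1 ht)
          exact Finset.mem_Icc.2 ⟨h1, h2⟩)
        (by
          intro t ht hnt
          simp only [Finset.mem_Icc] at ht
          exact hz t ht.1 ht.2 (fun hm => hnt (List.mem_toFinset.2 hm)))
    rw [e4, sum_Icc_cntEQ l h cap hcap]
  rw [← e3]
  exact e2

lemma foldA_id (k : Int) (hk0 : k ≤ 0) :
    ∀ (l : List Int), (∀ x ∈ l, 0 ≤ x) → ∀ d : List Int,
    l.foldl (fun d a =>
      (PySem.List.pyRange (k - 1 - a) (-1) (-1)).foldl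
        (fun d i => PySem.List.pySetD d (i + a)
          (PySem.List.pyGetD d (i + a) 0 + PySem.List.pyGetD d i 0)) d) d = d := by
  intro l
  induction l with
  | nil => intro _ d; rfl
  | cons a l ih =>
    intro hl d
    simp only [List.foldl_cons]
    rw [PySem.List.pyRange_neg_one_eq_nil (by
        have := hl a (by simp)
        omega), List.foldl_nil]
    exact ih (fun x hx => hl x (by simp [hx])) d

lemma pvDist_negcap (A : List Int) (cap p : Int) (hcap : cap < 0) :
    ∀ (fuel lo hi : Nat), pvDist A cap p fuel lo hi = PySem.Dict.empty := by
  have hbase : ∀ lo hi : Nat, pvDistBase A cap p lo hi = PySem.Dict.empty := by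
    intro lo hi
    unfold pvDistBase
    rw [if_neg (show ¬ (0 ≤ cap) by omega)]
    by_cases h1 : lo < hi
    · rw [if_pos h1, if_neg (fun h : 0 ≤ A.getD lo 0 ∧ A.getD lo 0 ≤ cap =>
        absurd (le_trans h.1 h.2) (by omega))]
    · rw [if_neg h1]
  intro fuel
  induction fuel with
  | zero => intro lo hi; exact hbase lo hi
  | succ fuel ih =>
    intro lo hi
    rw [pvDist]
    split_ifs with h1
    · exact hbase lo hi
    · rw [ih, ih]
      rfl

lemma final_mod (X S p : Int) (hp : 0 < p) :
    PySem.Int.mod (X - 2 * (S % p)) p = PySem.Int.mod (X - S * 2) p := by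
  rw [PySem.Int.mod_eq_emod_of_pos hp, PySem.Int.mod_eq_emod_of_pos hp]
  conv_lhs => rw [Int.sub_emod]
  conv_rhs => rw [Int.sub_emod]
  congr 2
  rw [Int.mul_emod, Int.emod_emod_of_dvd _ dvd_rfl, ← Int.mul_emod, mul_comm]

-- ===== VERDICT (by name: the statement is the Claim_ definition above) =====
theorem countPartitionsFast2_spec : Claim_unchanged_countPartitionsFast2 := by
  intro A k _ hpre
  unfold Spec_countPartitionsFast2
  intro hnd
  unfold countPartitionsFast2 countPartitionsFast2_alt
  by_cases hg : A.sum < k * 2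
  · simp [hg]
  · simp only [if_neg hg]
    have hA : ∀ a ∈ A, 0 ≤ a := by
      rcases hpre with h | h
      · exact absurd h hg
      · exact h
    have hk : 1 ≤ k := by
      unfold D_countPartitionsFast2 at hnd
      rcases (em (k ≤ 0)) with h | h
      · exact absurd ⟨h, hg⟩ hnd
      · omega
    have hmdpos : (0 : Int) < 10 ^ 9 + 7 := by norm_num
    have hmd1 : (1 : Int) < 10 ^ 9 + 7 := by norm_num
    rw [initA k hk, foldA k hk A [] (by simp) hA, List.nil_append]
    have hsum : ((List.range k.toNat).map (fun i : Nat => cntEQ A (i : Int))).sum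
        = cntLE A (k - 1) := by
      rw [sum_map_range_cntEQ A hA k.toNat, show ((k.toNat : Nat) : Int) - 1 = k - 1 by omega]
    rw [hsum]
    have hinv := pvDist_inv A (k - 1) (10 ^ 9 + 7) hmd1 hA A.length 0 A.length
      (by omega) (le_refl _) (by omega)
    rw [List.drop_zero, Nat.sub_zero, List.take_length] at hinv
    have hvs := values_sum_mod (k - 1) (10 ^ 9 + 7) hmdpos _ A hinv hA (by omega)
    rw [PySem.Int.mod_eq_emod_of_pos hmdpos
      (a := (pvDist A (k - 1) (10 ^ 9 + 7) A.length 0 A.length).values.sum), hvs]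
    exact (final_mod _ _ _ hmdpos).symm

theorem countPartitionsFast2_changed : Claim_changed_countPartitionsFast2 := by
  unfold Claim_changed_countPartitionsFast2; decide

theorem countPartitionsFast2_tight : Claim_exact_countPartitionsFast2 := by
  intro A k _ hpre hd
  unfold D_countPartitionsFast2 at hd
  obtain ⟨hk0, hg⟩ := hd
  have hA : ∀ a ∈ A, 0 ≤ a := by
    rcases hpre with h | h
    · exact absurd h hg
    · exact h
  unfold countPartitionsFast2 countPartitionsFast2_alt
  simp only [if_neg hg]
  rw [show (k - 1).toNat = 0 by omega, List.replicate_zero, foldA_id k hk0 A hA [1],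
      pvDist_negcap A (k - 1) (10 ^ 9 + 7) (by omega)]
  have hmdpos : (0 : Int) < 10 ^ 9 + 7 := by norm_num
  simp only [PySem.Int.mod_eq_emod_of_pos hmdpos]
  rw [show (PySem.Dict.empty : PySem.Dict Int Int).values = [] from rfl]
  simp only [List.sum_cons, List.sum_nil, List.sum_nil]
  set X : Int := 2 ^ A.length % (10 ^ 9 + 7) with hX
  have hX0 : 0 ≤ X := Int.emod_nonneg _ (by norm_num)
  have hXlt : X < 10 ^ 9 + 7 := Int.emod_lt_of_pos _ (by norm_num)
  have hrhs : (X - 2 * (0 % (10 ^ 9 + 7))) % (10 ^ 9 + 7) = X := by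
    rw [Int.zero_emod, mul_zero, sub_zero, Int.emod_eq_of_lt hX0 hXlt]
  have hlhs : (X - (1 + 0) * 2) % (10 ^ 9 + 7) ≠ X := by
    by_cases h2 : 2 ≤ X
    · rw [show X - (1 + 0) * 2 = X - 2 by ring, Int.emod_eq_of_lt (by omega) (by omega)]
      omega
    · rw [show X - (1 + 0) * 2 = X - 2 by ring,
          show X - 2 = X - 2 + (10 ^ 9 + 7) - (10 ^ 9 + 7) by ring, Int.sub_emod_right,
          Int.emod_eq_of_lt (by omega) (by omega)]
      omega
  intro heq
  rw [hrhs] at heq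
  exact hlhs heq
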